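-- pv_equiv track=rewrite | github.com/creditimpact/finance-platform | scripts/score_bureau_pairs.py | _format_top_parts
-- ===== SOURCE A (Python) =====
-- from typing import Any, Dict, Iterable, List, Mapping, Optional, Sequence, Tuple
--
-- FIELD_SEQUENCE: Tuple[str, ...] = (
--     "balance_owed",
--     "account_number",
--     "last_payment",
--     "past_due_amount",
--     "high_balance",
--     "creditor_type",
--     "account_type",
--     "payment_amount",
--     "credit_limit",
--     "last_verified",
--     "date_of_last_activity",
--     "date_reported",
--     "date_opened",
--     "closed_date",
-- )
--
-- def _format_top_parts(parts: Mapping[str, int], limit: int = 5) -> str: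
--     sortable = []
--     for field in FIELD_SEQUENCE:
--         try:
--             points = int(parts.get(field, 0) or 0)
--         except (TypeError, ValueError):
--             points = 0
--         if points > 0:
--             sortable.append((field, points))
--     if not sortable:
--         return "-"
--
--     sortable.sort(key=lambda item: (-item[1], item[0]))
--     top = [f"{field}={points}" for field, points in sortable[:limit]]
--     return ", ".join(top)
-- ===== SOURCE B (Python) =====
-- FIELD_SEQUENCE = (
--     "balance_owed",
--     "account_number",
--     "last_payment",
--     "past_due_amount",
--     "high_balance",
--     "creditor_type",
--     "account_type",
--     "payment_amount",
--     "credit_limit",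
--     "last_verified",
--     "date_of_last_activity",
--     "date_reported",
--     "date_opened",
--     "closed_date",
-- )
--
-- # the same 14 field names, alphabetically ordered once at module load
-- _ALPHA_FIELDS = tuple(sorted(FIELD_SEQUENCE))
--
--
-- def _score(parts, field):
--     try:
--         return int(parts.get(field, 0) or 0)
--     except (TypeError, ValueError):
--         return 0
--
--
-- def _format_top_parts(parts, limit=5):
--     positive = [f for f in _ALPHA_FIELDS if _score(parts, f) > 0]
--     if not positive:
--         return "-"
--     out = []
--     for pts in sorted({_score(parts, f) for f in positive}, reverse=True):
--         out += [f"{f}={pts}" for f in positive if _score(parts, f) == pts]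
--     return ", ".join(out[:limit])
-- ===== Notes on version B (the rewrite author's own statement) =====
-- stated objective: alternative
-- what changed: A appends (field, points) pairs in FIELD_SEQUENCE order and runs one full sort under the tuple key (-points, field) before slicing; B never sorts pairs at all: it filters the field NAMES in a precomputed alphabetical order, sorts only the set of distinct point values descending, and emits each equal-points bucket of already-alphabetical fields, slicing the formatted strings at the end.
import Mathlib
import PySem

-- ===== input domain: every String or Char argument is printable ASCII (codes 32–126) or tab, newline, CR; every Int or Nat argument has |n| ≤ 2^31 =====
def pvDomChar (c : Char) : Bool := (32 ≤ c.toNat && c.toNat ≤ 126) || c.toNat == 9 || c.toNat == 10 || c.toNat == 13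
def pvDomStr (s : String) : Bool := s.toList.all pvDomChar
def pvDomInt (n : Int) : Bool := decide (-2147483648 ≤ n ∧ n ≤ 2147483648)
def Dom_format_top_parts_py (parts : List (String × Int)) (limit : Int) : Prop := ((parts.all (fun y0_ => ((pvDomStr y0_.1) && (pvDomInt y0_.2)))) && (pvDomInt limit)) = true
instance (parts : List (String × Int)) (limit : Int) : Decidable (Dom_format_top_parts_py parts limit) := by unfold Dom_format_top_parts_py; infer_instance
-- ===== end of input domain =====

-- B replaces A's single full sort of (field, points) pairs under the tuple key (-points, field) by a
-- bucket traversal over field NAMES: the positive fields are taken in a precomputed alphabetical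
-- order, only the DISTINCT point values are sorted (descending), and each bucket is formatted in the
-- already-alphabetical order; objective: alternative (same cost on the fixed 14-field input).

-- ===== PORT A =====
-- FIELD_SEQUENCE (module constant)
def pvFields : List String :=
  ["balance_owed", "account_number", "last_payment", "past_due_amount", "high_balance",
   "creditor_type", "account_type", "payment_amount", "credit_limit", "last_verified",
   "date_of_last_activity", "date_reported", "date_opened", "closed_date"]

-- `int(parts.get(field, 0) or 0)` on int dict values is `parts.get(field, 0)` itself:
-- `x or 0` maps 0 to 0 and is the identity otherwise, `int` is the identity on ints,
-- and the except-branch is unreachable.  parts.get → PySem.Dict.getD.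
def format_top_parts_py (parts : List (String × Int)) (limit : Int) : String :=
  let sortable := pvFields.foldl (fun acc field =>
      let points := (PySem.Dict.mk parts).getD field 0
      if points > 0 then acc ++ [(field, points)] else acc) []
  if sortable = [] then "-"
  else
    let sorted := PySem.List.sorted2 sortable (fun item => -item.2) (fun item => item.1)
    PySem.Str.join ", " ((PySem.List.slice sorted none (some limit)).map
      (fun e => e.1 ++ "=" ++ PySem.Int.toStr e.2))

-- ===== PORT B =====
-- _ALPHA_FIELDS = tuple(sorted(FIELD_SEQUENCE)) (module constant, written out)
def pvAlphaFields : List String :=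
  ["account_number", "account_type", "balance_owed", "closed_date", "credit_limit",
   "creditor_type", "date_of_last_activity", "date_opened", "date_reported", "high_balance",
   "last_payment", "last_verified", "past_due_amount", "payment_amount"]

-- _score(parts, field): on int dict values `int(v or 0)` is the value itself, the except branch unreachable
def pvScore (parts : List (String × Int)) (field : String) : Int :=
  (PySem.Dict.mk parts).getD field 0

def format_top_parts_py_alt (parts : List (String × Int)) (limit : Int) : String :=
  let positive := pvAlphaFields.filter (fun f => pvScore parts f > 0)
  if positive = [] then "-"
  else
    let vals := PySem.List.sorted (PySem.Set.ofList (positive.map (pvScore parts))) (fun p => p) true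
    let out := vals.foldl (fun acc pts =>
        acc ++ (positive.filter (fun f => pvScore parts f == pts)).map
          (fun f => f ++ "=" ++ PySem.Int.toStr pts)) []
    PySem.Str.join ", " (PySem.List.slice out none (some limit))

-- ===== PRECONDITION & SPEC =====
def Spec_format_top_parts_py (parts : List (String × Int)) (limit : Int) (out : String) : Prop := out = format_top_parts_py_alt parts limit
instance (parts : List (String × Int)) (limit : Int) (out : String) : Decidable (Spec_format_top_parts_py parts limit out) := by unfold Spec_format_top_parts_py; infer_instance

-- ===== CLAIM (what is proved, stated in full; the proofs are below) =====
def Claim_equal_format_top_parts_py : Prop := ∀ (parts : List (String × Int)) (limit : Int), Dom_format_top_parts_py parts limit → Spec_format_top_parts_py parts limit (format_top_parts_py parts limit)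

-- ===== LEMMAS AND PROOFS =====

lemma pvLt2_eq_lex {alpha : Type} (k1 : alpha → Int) (k2 : alpha → String) (a b : alpha) :
    (decide (k1 a < k1 b) || (!decide (k1 b < k1 a) && decide (k2 a < k2 b)))
      = decide (toLex (k1 a, k2 a) < toLex (k1 b, k2 b)) := by
  rcases lt_trichotomy (k1 a) (k1 b) with h | h | h
  · simp [Prod.Lex.toLex_lt_toLex, h, not_lt.2 (le_of_lt h)]
  · simp [Prod.Lex.toLex_lt_toLex, h]
  · have hnle : ¬ k1 a ≤ k1 b := not_le.2 h
    simp [Prod.Lex.toLex_lt_toLex, not_lt.2 (le_of_lt h), hnle, (ne_of_gt h)]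

lemma pvSorted2_eq_sorted_lex {alpha : Type} (xs : List alpha) (k1 : alpha → Int) (k2 : alpha → String) :
    PySem.List.sorted2 xs k1 k2 = PySem.List.sorted xs (fun x => toLex (k1 x, k2 x)) := by
  unfold PySem.List.sorted2 PySem.List.sorted
  have hf : (fun (a b : alpha) => decide (k1 a < k1 b) || (!decide (k1 b < k1 a) && decide (k2 a < k2 b)))
      = fun a b => decide (toLex (k1 a, k2 a) < toLex (k1 b, k2 b)) := by
    funext a b; exact pvLt2_eq_lex k1 k2 a b
  simp only [if_neg (by decide : ¬ (false = true))]
  rw [hf]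

lemma pvSlice_map {alpha beta : Type} (f : alpha → beta) (l : List alpha) (a b : Option Int) :
    PySem.List.slice (l.map f) a b = (PySem.List.slice l a b).map f := by
  cases a <;> cases b <;>
    simp [PySem.List.slice, List.map_take, List.map_drop]

lemma pvCount_flatMap_filter (l : List (String × Int)) (a : String × Int) :
    ∀ vs : List Int, vs.Nodup →
      List.count a (vs.flatMap (fun v => l.filter (fun e => e.2 == v)))
        = if a.2 ∈ vs then List.count a l else 0 := by
  intro vs
  induction vs with
  | nil => intro _; simp
  | cons v t ih =>
    intro hnd
    rcases List.nodup_cons.mp hnd with ⟨hv, ht⟩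
    simp only [List.flatMap_cons, List.count_append, ih ht, List.mem_cons]
    by_cases h : a.2 = v
    · rw [List.count_filter (by simp [h])]
      simp [h, hv]
    · have h0 : List.count a (l.filter (fun e => e.2 == v)) = 0 := by
        rw [List.count_eq_zero]
        intro hm
        exact h (by simpa using (List.mem_filter.mp hm).2)
      simp [h0, h]

-- ===== VERDICT (by name: the statement is the Claim_ definition above) =====
theorem format_top_parts_py_spec : Claim_equal_format_top_parts_py := by
  intro parts limit _
  unfold Spec_format_top_parts_py format_top_parts_py format_top_parts_py_alt pvScore
  simp only [PySem.List.foldl_append_ite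
      (p := fun f => (PySem.Dict.mk parts).getD f 0 > 0)
      (f := fun f => (f, (PySem.Dict.mk parts).getD f 0)), List.nil_append]
  set sc : String → Int := fun f => (PySem.Dict.mk parts).getD f 0 with hsc
  set g : String → String × Int := fun f => (f, sc f) with hg
  set positive := pvAlphaFields.filter (fun f => decide (sc f > 0)) with hpos
  set posF := pvFields.filter (fun f => decide (sc f > 0)) with hposF
  set scoredB := positive.map g with hscoredB
  set sortable := posF.map g with hsortable
  have hperm0 : pvAlphaFields.Perm pvFields := by decide
  have hpermP : positive.Perm posF := hperm0.filter _
  have hperm : scoredB.Perm sortable := hpermP.map g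
  by_cases hempty : posF = []
  · have hpe : positive = [] := List.eq_nil_of_length_eq_zero (by rw [hpermP.length_eq, hempty]; rfl)
    simp [hempty, hpe, hsortable]
  · have hsne : sortable ≠ [] := by
      rw [hsortable]; simpa using hempty
    have hpne : positive ≠ [] := fun h => hempty (List.eq_nil_of_length_eq_zero (by rw [← hpermP.length_eq, h]; rfl))
    rw [if_neg hsne, if_neg hpne]
    have hmapsc : positive.map sc = scoredB.map (fun e => e.2) := by
      rw [hscoredB, List.map_map]; rfl
    rw [hmapsc]
    rw [PySem.List.foldl_append_eq_flatMap, List.nil_append]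
    set vals := PySem.List.sorted (PySem.Set.ofList (scoredB.map (fun e => e.2))) (fun p => p) true with hvals
    have hvnd : vals.Nodup := (PySem.List.sorted_perm _ _ _).symm.nodup (PySem.Set.nodup_ofList _)
    have hvgt : vals.Pairwise (fun a b => b < a) := by
      have h1 := PySem.List.sorted_pairwise_rev (PySem.Set.ofList (scoredB.map (fun e => e.2))) (fun p => p)
      exact (h1.and hvnd).imp (fun hab => lt_of_le_of_ne hab.1 (Ne.symm hab.2))
    have hcomp : ∀ e ∈ scoredB, e.2 ∈ vals := by
      intro e he
      rw [hvals, PySem.List.mem_sorted, PySem.Set.mem_ofList]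
      exact List.mem_map_of_mem he
    -- each bucket of B is the corresponding bucket of pairs, formatted
    have hbucket : ∀ v : Int,
        (positive.filter (fun f => (PySem.Dict.mk parts).getD f 0 == v)).map (fun f => f ++ "=" ++ PySem.Int.toStr v)
          = (scoredB.filter (fun e => e.2 == v)).map (fun e => e.1 ++ "=" ++ PySem.Int.toStr e.2) := by
      intro v
      rw [hscoredB, List.filter_map, List.map_map]
      refine (List.map_congr_left ?_).symm
      intro f hf
      have hv : (PySem.Dict.mk parts).getD f 0 = v := by simpa using (List.mem_filter.mp hf).2
      simp [hg, hsc, Function.comp, hv]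
    simp only [hbucket]
    set pairs := vals.flatMap (fun v => scoredB.filter (fun e => e.2 == v)) with hpairs
    have hpp : pairs.Perm scoredB := by
      rw [List.perm_iff_count]; intro a
      rw [hpairs, pvCount_flatMap_filter scoredB a vals hvnd]
      by_cases ha : a ∈ scoredB
      · simp [hcomp a ha]
      · simp [List.count_eq_zero_of_not_mem ha]
    have hpsort : pairs.Perm sortable := hpp.trans hperm
    have hscpw : scoredB.Pairwise (fun a b => a.1 < b.1) := by
      have halpha0 : pvAlphaFields.Pairwise (fun a b => a.toList < b.toList) := by decide
      have halpha : pvAlphaFields.Pairwise (fun a b => a < b) :=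
        halpha0.imp (fun hab => String.lt_iff_toList_lt.mpr hab)
      rw [hscoredB, List.pairwise_map]
      exact (halpha.filter _).imp (fun hab => hab)
    have hppw : pairs.Pairwise (fun a b => toLex (-a.2, a.1) < toLex (-b.2, b.1)) := by
      rw [hpairs, List.flatMap_def, List.pairwise_flatten]
      constructor
      · intro l' hl'
        obtain ⟨v, hv, rfl⟩ := List.mem_map.mp hl'
        refine ((hscpw.filter (fun e => e.2 == v)).imp_of_mem ?_)
        intro a b ha hb hab
        have ha2 : a.2 = v := by simpa using (List.mem_filter.mp ha).2
        have hb2 : b.2 = v := by simpa using (List.mem_filter.mp hb).2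
        rw [Prod.Lex.toLex_lt_toLex]
        exact Or.inr ⟨by rw [ha2, hb2], hab⟩
      · refine List.pairwise_map.mpr (hvgt.imp ?_)
        intro v1 v2 hlt x hx y hy
        have hx2 : x.2 = v1 := by simpa using (List.mem_filter.mp hx).2
        have hy2 : y.2 = v2 := by simpa using (List.mem_filter.mp hy).2
        rw [Prod.Lex.toLex_lt_toLex]
        refine Or.inl ?_
        rw [hx2, hy2]
        omega
    have hsorted : PySem.List.sorted2 sortable (fun item => -item.2) (fun item => item.1) = pairs :=
      by
      rw [pvSorted2_eq_sorted_lex]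
      exact PySem.List.sorted_eq_of_perm_of_pairwise_lt sortable pairs _ hpsort hppw
    rw [hsorted]
    have hB : vals.flatMap (fun v => (scoredB.filter (fun e => e.2 == v)).map
        (fun e => e.1 ++ "=" ++ PySem.Int.toStr e.2)) = pairs.map (fun e => e.1 ++ "=" ++ PySem.Int.toStr e.2) := by
      rw [hpairs, List.map_flatMap]
    rw [hB, pvSlice_map]
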